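-- pv_equiv track=rewrite | github.com/trezor/trezor-firmware | python/src/trezorlib/eos.py | name_to_number
-- ===== SOURCE A (Python) =====
-- def name_to_number(name):
--     length = len(name)
--     value = 0
--
--     for i in range(0, 13):
--         c = 0
--         if i < length and i < 13:
--             c = char_to_symbol(name[i])
--
--         if i < 12:
--             c &= 0x1F
--             c <<= 64 - 5 * (i + 1)
--         else:
--             c &= 0x0F
--
--         value |= c
--
--     return value
--
-- def char_to_symbol(c):
--     if c >= "a" and c <= "z":
--         return ord(c) - ord("a") + 6
--     elif c >= "1" and c <= "5":
--         return ord(c) - ord("1") + 1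
--     else:
--         return 0
-- ===== SOURCE B (Python) =====
-- def char_to_symbol(c):
--     if c >= "a" and c <= "z":
--         return ord(c) - ord("a") + 6
--     elif c >= "1" and c <= "5":
--         return ord(c) - ord("1") + 1
--     else:
--         return 0
--
-- def bin_fixed(n, width):
--     # fixed-width binary string of n, most significant bit first
--     return "".join("1" if n & (1 << (width - 1 - j)) else "0" for j in range(width))
--
-- def name_to_number(name):
--     # map characters to symbols, over-padded with zeros
--     syms = [char_to_symbol(ch) for ch in name[:13]] + [0] * 13
--     # build the 64-character binary representation: twelve 5-bit fields, one 4-bit field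
--     bits = ""
--     for s in syms[:12]:
--         bits += bin_fixed(s, 5)
--     bits += bin_fixed(syms[12] % 16, 4)
--     # parse the binary string
--     return int(bits, 2)
-- ===== Notes on version B (the rewrite author's own statement) =====
-- stated objective: alternative
-- what changed: B goes through a textual intermediate: it renders each symbol as a fixed-width binary string (twelve 5-bit fields and one 4-bit field), concatenates the 64 digit characters, and parses the result with int(bits, 2), instead of A's masking, absolute-position shifts 64-5*(i+1) and bitwise OR into an integer word.
import Mathlib
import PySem

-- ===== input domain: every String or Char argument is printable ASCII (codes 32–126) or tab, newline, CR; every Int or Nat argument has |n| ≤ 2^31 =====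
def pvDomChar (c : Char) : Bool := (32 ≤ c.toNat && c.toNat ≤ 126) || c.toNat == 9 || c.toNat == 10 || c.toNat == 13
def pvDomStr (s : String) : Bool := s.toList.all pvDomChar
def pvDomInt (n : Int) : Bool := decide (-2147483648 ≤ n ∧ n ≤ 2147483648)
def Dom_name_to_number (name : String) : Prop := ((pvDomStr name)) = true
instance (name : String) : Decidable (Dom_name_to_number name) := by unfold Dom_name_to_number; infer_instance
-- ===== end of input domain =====

-- B re-implements the EOS name encoder through a textual intermediate: it renders each symbol as a
-- fixed-width binary string, concatenates the 64 digit characters and parses the result, instead of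
-- A's per-index masked shifts OR-ed into a 64-bit word (objective: alternative).

-- ===== PORT A =====
-- char_to_symbol: Python compares single-char strings, which is code-point comparison (exact on Char)
def char_to_symbol (c : Char) : Int :=
  if 'a' ≤ c ∧ c ≤ 'z' then (c.toNat : Int) - ('a'.toNat : Int) + 6
  else if '1' ≤ c ∧ c ≤ '5' then (c.toNat : Int) - ('1'.toNat : Int) + 1
  else 0

-- literal port of A: for i in range(0,13): c = 0; if i < length and i < 13: c = char_to_symbol(name[i]);
--   then mask/shift and OR into value.  name[i] is ported as pyGetD (the guard i < length makes it in-range);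
--   the shift amount 64 - 5*(i+1) is nonnegative for every taken branch (i < 12), so .toNat is exact.
def name_to_number (name : String) : Int :=
  let length : Int := PySem.Str.len name
  let value : Int := 0
  (PySem.List.pyRange 0 13 1).foldl (fun value i =>
    let c : Int := if i < length ∧ i < 13 then char_to_symbol (PySem.List.pyGetD name.toList i ' ') else 0
    let c : Int := if i < 12 then (PySem.Int.band c 31) <<< (64 - 5*(i+1)).toNat else PySem.Int.band c 15
    PySem.Int.bor value c) value

-- ===== PORT B =====
-- port of bin_fixed: "".join("1" if n & (1 << (width-1-j)) else "0" for j in range(width));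
--   Python's truthiness of the int 'n & (1 << k)' is 'nonzero', ported as ≠ 0
def bin_fixed (n : Int) (w : Nat) : List Char :=
  (List.range w).map (fun j => if PySem.Int.band n ((1:Int) <<< (w - 1 - j)) ≠ 0 then '1' else '0')

-- literal port of Source B: syms = [char_to_symbol(ch) for ch in name[:13]] + [0]*13;
--   bits = concatenation of bin_fixed(s,5) over syms[:12], then bin_fixed(syms[12] % 16, 4);
--   int(bits, 2) is ported by hand as the left fold v*2 + digit, exact on the nonempty '0'/'1'
--   strings that Source B builds
def name_to_number_alt (name : String) : Int :=
  let syms := (PySem.List.slice name.toList none (some 13)).map char_to_symbol ++ List.replicate 13 (0:Int)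
  let bits := (PySem.List.slice syms none (some 12)).foldl (fun acc s => acc ++ bin_fixed s 5) ([] : List Char)
  let bits := bits ++ bin_fixed (PySem.Int.mod (PySem.List.pyGetD syms 12 0) 16) 4
  bits.foldl (fun v ch => v * 2 + if ch = '1' then 1 else 0) 0

-- ===== PRECONDITION & SPEC =====
def Spec_name_to_number (name : String) (out : Int) : Prop := out = name_to_number_alt name
instance (name : String) (out : Int) : Decidable (Spec_name_to_number name out) := by unfold Spec_name_to_number; infer_instance

-- ===== CLAIM (what is proved, stated in full; the proofs are below) =====
def Claim_equal_name_to_number : Prop := ∀ (name : String), Dom_name_to_number name → Spec_name_to_number name (name_to_number name)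

-- ===== LEMMAS AND PROOFS =====

-- char_to_symbol always yields a 5-bit value
theorem charsym_bound (c : Char) : 0 ≤ char_to_symbol c ∧ char_to_symbol c < 32 := by
  unfold char_to_symbol
  split_ifs with h1 h2 <;> try simp
  · rcases h1 with ⟨ha, hb⟩
    simp only [Char.le_def, UInt32.le_iff_toNat_le] at ha hb
    change 97 ≤ c.toNat at ha
    change c.toNat ≤ 122 at hb
    omega
  · rcases h2 with ⟨ha, hb⟩
    simp only [Char.le_def, UInt32.le_iff_toNat_le] at ha hb
    change 49 ≤ c.toNat at ha
    change c.toNat ≤ 53 at hb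
    constructor <;> omega

-- each loop entry (a guarded symbol) is a 5-bit value
theorem ifsym_bound (P : Prop) [Decidable P] (c : Char) :
    0 ≤ (if P then char_to_symbol c else 0) ∧ (if P then char_to_symbol c else 0) < 32 := by
  split
  · exact charsym_bound c
  · norm_num

theorem mask31 (c : Int) (h0 : 0 ≤ c) (h : c < 32) : PySem.Int.band c 31 = c := by
  interval_cases c <;> decide

theorem mask15 (c : Int) (h0 : 0 ≤ c) (h : c < 32) : PySem.Int.band c 15 = c % 16 := by
  interval_cases c <;> decide

-- OR of a value shifted 5 bits above a 5-bit value is plain place-value arithmetic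
theorem step (w c : Int) (j k : Nat) (hjk : k + 5 = j) (hw : 0 ≤ w) (hc0 : 0 ≤ c) (hc : c < 32) :
    PySem.Int.bor (w * 2^j) (c <<< k) = (w*32 + c) * 2^k := by
  have h1 : (0:Int) ≤ w * 2^j := by positivity
  have h2 : (0:Int) ≤ c <<< k := by rw [Int.shiftLeft_eq]; positivity
  have hp : ∀ m : Nat, ((2:Int)^m).toNat = 2^m := by
    intro m; rw [show (2:Int)^m = ((2^m : Nat) : Int) by push_cast; ring, Int.toNat_natCast]
  have e1 : (w * 2^j).toNat = w.toNat * 2^j := by rw [Int.toNat_mul hw (by positivity), hp]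
  have e2 : (c <<< k).toNat = c.toNat <<< k := by
    rw [Int.shiftLeft_eq, Int.toNat_mul hc0 (by positivity), Nat.shiftLeft_eq, hp]
  rw [PySem.Int.bor_of_nonneg h1 h2, e1, e2]
  have e3 : w.toNat * 2^j = (w.toNat * 32) <<< k := by rw [Nat.shiftLeft_eq]; subst hjk; ring
  have e4 : w.toNat * 32 ||| c.toNat = w.toNat * 32 + c.toNat := by
    rw [show w.toNat*32 = 2^5 * w.toNat by ring]
    exact (Nat.two_pow_add_eq_or_of_lt (show c.toNat < 2^5 by omega) w.toNat).symm
  rw [e3, ← Nat.shiftLeft_or_distrib, e4, Nat.shiftLeft_eq]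
  push_cast
  rw [Int.toNat_of_nonneg hw, Int.toNat_of_nonneg hc0]

-- the final OR glues the 4 low bits under a value shifted 4 bits up
theorem step0 (w r : Int) (hw : 0 ≤ w) (hr0 : 0 ≤ r) (hr : r < 16) :
    PySem.Int.bor (w * 2^4) r = w * 16 + r := by
  have h1 : (0:Int) ≤ w * 2^4 := by positivity
  rw [PySem.Int.bor_of_nonneg h1 hr0]
  have e1 : (w * 2^4).toNat = w.toNat * 2^4 := by
    rw [Int.toNat_mul hw (by positivity)]; rw [show ((2:Int)^4).toNat = 2^4 from rfl]
  rw [e1, show w.toNat * 2^4 = 2^4 * w.toNat by ring,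
      ← Nat.two_pow_add_eq_or_of_lt (show r.toNat < 2^4 by omega) w.toNat]
  push_cast
  rw [Int.toNat_of_nonneg hr0, Int.toNat_of_nonneg hw]
  ring

theorem core (e0 : Int) (e1 : Int) (e2 : Int) (e3 : Int) (e4 : Int) (e5 : Int) (e6 : Int) (e7 : Int) (e8 : Int) (e9 : Int) (e10 : Int) (e11 : Int) (e12 : Int) (h0 : 0 ≤ e0 ∧ e0 < 32) (h1 : 0 ≤ e1 ∧ e1 < 32) (h2 : 0 ≤ e2 ∧ e2 < 32) (h3 : 0 ≤ e3 ∧ e3 < 32) (h4 : 0 ≤ e4 ∧ e4 < 32) (h5 : 0 ≤ e5 ∧ e5 < 32) (h6 : 0 ≤ e6 ∧ e6 < 32) (h7 : 0 ≤ e7 ∧ e7 < 32) (h8 : 0 ≤ e8 ∧ e8 < 32) (h9 : 0 ≤ e9 ∧ e9 < 32) (h10 : 0 ≤ e10 ∧ e10 < 32) (h11 : 0 ≤ e11 ∧ e11 < 32) (h12 : 0 ≤ e12 ∧ e12 < 32) :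
    PySem.Int.bor (PySem.Int.bor (PySem.Int.bor (PySem.Int.bor (PySem.Int.bor (PySem.Int.bor (PySem.Int.bor (PySem.Int.bor (PySem.Int.bor (PySem.Int.bor (PySem.Int.bor (PySem.Int.bor (PySem.Int.bor 0 (PySem.Int.band e0 31 <<< (59 : Nat))) (PySem.Int.band e1 31 <<< (54 : Nat))) (PySem.Int.band e2 31 <<< (49 : Nat))) (PySem.Int.band e3 31 <<< (44 : Nat))) (PySem.Int.band e4 31 <<< (39 : Nat))) (PySem.Int.band e5 31 <<< (34 : Nat))) (PySem.Int.band e6 31 <<< (29 : Nat))) (PySem.Int.band e7 31 <<< (24 : Nat))) (PySem.Int.band e8 31 <<< (19 : Nat))) (PySem.Int.band e9 31 <<< (14 : Nat))) (PySem.Int.band e10 31 <<< (9 : Nat))) (PySem.Int.band e11 31 <<< (4 : Nat))) (PySem.Int.band e12 15) = ((((((((((((0 * 32 + e0) * 32 + e1) * 32 + e2) * 32 + e3) * 32 + e4) * 32 + e5) * 32 + e6) * 32 + e7) * 32 + e8) * 32 + e9) * 32 + e10) * 32 + e11) * 16 + e12 % 16 := by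
  rw [mask31 e0 h0.1 h0.2, mask31 e1 h1.1 h1.2, mask31 e2 h2.1 h2.2, mask31 e3 h3.1 h3.2, mask31 e4 h4.1 h4.2, mask31 e5 h5.1 h5.2, mask31 e6 h6.1 h6.2, mask31 e7 h7.1 h7.2, mask31 e8 h8.1 h8.2, mask31 e9 h9.1 h9.2, mask31 e10 h10.1 h10.2, mask31 e11 h11.1 h11.2, mask15 e12 h12.1 h12.2]
  rw [PySem.Int.bor_comm 0 _, PySem.Int.bor_zero, Int.shiftLeft_eq e0 59]
  rw [step (e0) e1 59 54 rfl (by omega) h1.1 h1.2]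
  rw [step ((e0) * 32 + e1) e2 54 49 rfl (by omega) h2.1 h2.2]
  rw [step (((e0) * 32 + e1) * 32 + e2) e3 49 44 rfl (by omega) h3.1 h3.2]
  rw [step ((((e0) * 32 + e1) * 32 + e2) * 32 + e3) e4 44 39 rfl (by omega) h4.1 h4.2]
  rw [step (((((e0) * 32 + e1) * 32 + e2) * 32 + e3) * 32 + e4) e5 39 34 rfl (by omega) h5.1 h5.2]
  rw [step ((((((e0) * 32 + e1) * 32 + e2) * 32 + e3) * 32 + e4) * 32 + e5) e6 34 29 rfl (by omega) h6.1 h6.2]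
  rw [step (((((((e0) * 32 + e1) * 32 + e2) * 32 + e3) * 32 + e4) * 32 + e5) * 32 + e6) e7 29 24 rfl (by omega) h7.1 h7.2]
  rw [step ((((((((e0) * 32 + e1) * 32 + e2) * 32 + e3) * 32 + e4) * 32 + e5) * 32 + e6) * 32 + e7) e8 24 19 rfl (by omega) h8.1 h8.2]
  rw [step (((((((((e0) * 32 + e1) * 32 + e2) * 32 + e3) * 32 + e4) * 32 + e5) * 32 + e6) * 32 + e7) * 32 + e8) e9 19 14 rfl (by omega) h9.1 h9.2]
  rw [step ((((((((((e0) * 32 + e1) * 32 + e2) * 32 + e3) * 32 + e4) * 32 + e5) * 32 + e6) * 32 + e7) * 32 + e8) * 32 + e9) e10 14 9 rfl (by omega) h10.1 h10.2]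
  rw [step (((((((((((e0) * 32 + e1) * 32 + e2) * 32 + e3) * 32 + e4) * 32 + e5) * 32 + e6) * 32 + e7) * 32 + e8) * 32 + e9) * 32 + e10) e11 9 4 rfl (by omega) h11.1 h11.2]
  rw [step0 ((((((((((((e0) * 32 + e1) * 32 + e2) * 32 + e3) * 32 + e4) * 32 + e5) * 32 + e6) * 32 + e7) * 32 + e8) * 32 + e9) * 32 + e10) * 32 + e11) (e12 % 16) (by omega) (Int.emod_nonneg _ (by norm_num)) (Int.emod_lt_of_pos _ (by norm_num))]
  ring

-- the binary-digit fold shifts its accumulator past the whole list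
theorem parse_shift (l : List Char) (v : Int) :
    l.foldl (fun v ch => v * 2 + if ch = '1' then 1 else 0) v =
    v * 2 ^ l.length + l.foldl (fun v ch => v * 2 + if ch = '1' then 1 else 0) 0 := by
  induction l generalizing v with
  | nil => simp
  | cons ch l ih =>
    simp only [List.foldl_cons, List.length_cons]
    rw [ih (v * 2 + if ch = '1' then 1 else 0), ih (0 * 2 + if ch = '1' then 1 else 0)]
    ring

-- a 5-bit chunk parses back to its value
theorem parse5 (s : Int) (h0 : 0 ≤ s) (h : s < 32) :
    (bin_fixed s 5).foldl (fun v ch => v * 2 + if ch = '1' then 1 else 0) 0 = s := by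
  interval_cases s <;> decide

theorem parse4 (r : Int) (h0 : 0 ≤ r) (h : r < 16) :
    (bin_fixed r 4).foldl (fun v ch => v * 2 + if ch = '1' then 1 else 0) 0 = r := by
  interval_cases r <;> decide

theorem bin_fixed_length (n : Int) (w : Nat) : (bin_fixed n w).length = w := by
  simp [bin_fixed]

-- peeling one 5-bit chunk off the front of the digit string folds it into the accumulator
theorem chunk5 (rest : List Char) (v s : Int) (h0 : 0 ≤ s) (h : s < 32) :
    List.foldl (fun v ch => v * 2 + if ch = '1' then 1 else 0) v (bin_fixed s 5 ++ rest) =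
    List.foldl (fun v ch => v * 2 + if ch = '1' then 1 else 0) (v * 32 + s) rest := by
  rw [List.foldl_append, parse_shift (bin_fixed s 5) v, parse5 s h0 h, bin_fixed_length]
  norm_num

theorem chunk4 (v r : Int) (h0 : 0 ≤ r) (h : r < 16) :
    List.foldl (fun v ch => v * 2 + if ch = '1' then 1 else 0) v (bin_fixed r 4) = v * 16 + r := by
  rw [parse_shift (bin_fixed r 4) v, parse4 r h0 h, bin_fixed_length]
  norm_num

-- elementwise description of B's mapped-and-padded symbol list
theorem pad13_get (cs : List Char) (k : Nat) (hk : k < 13)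
    (hL : k < (List.map char_to_symbol (cs.take 13) ++ List.replicate 13 (0:Int)).length) :
    (List.map char_to_symbol (cs.take 13) ++ List.replicate 13 (0:Int))[k] =
    if k < cs.length then char_to_symbol (PySem.List.pyGetD cs (k:Int) ' ') else 0 := by
  by_cases h : k < cs.length
  · rw [if_pos h]
    have hkm : k < (List.map char_to_symbol (cs.take 13)).length := by
      simp [List.length_take]; omega
    rw [List.getElem_append_left hkm, List.getElem_map, List.getElem_take,
        PySem.List.pyGetD_natCast, List.getD_eq_getElem?_getD, List.getElem?_eq_getElem h]
    rfl
  · rw [if_neg h]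
    by_cases hkm : k < (List.map char_to_symbol (cs.take 13)).length
    · exfalso; simp [List.length_take] at hkm; omega
    · rw [List.getElem_append_right (by omega)]
      exact List.getElem_replicate ..

-- the first 13 entries of B's symbol list written out (conditions in the exact form A's loop leaves them)
theorem syms_eq (name : String) :
    (List.map char_to_symbol (PySem.List.slice name.toList none (some 13)) ++
      List.replicate 13 (0:Int)).take 13 =
    [if (0:Int) < (name.toList.length:Int) ∧ (0:Int) < 13 then char_to_symbol (PySem.List.pyGetD name.toList 0 ' ') else 0,
     if (1:Int) < (name.toList.length:Int) ∧ (1:Int) < 13 then char_to_symbol (PySem.List.pyGetD name.toList 1 ' ') else 0,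
     if (2:Int) < (name.toList.length:Int) ∧ (2:Int) < 13 then char_to_symbol (PySem.List.pyGetD name.toList 2 ' ') else 0,
     if (3:Int) < (name.toList.length:Int) ∧ (3:Int) < 13 then char_to_symbol (PySem.List.pyGetD name.toList 3 ' ') else 0,
     if (4:Int) < (name.toList.length:Int) ∧ (4:Int) < 13 then char_to_symbol (PySem.List.pyGetD name.toList 4 ' ') else 0,
     if (5:Int) < (name.toList.length:Int) ∧ (5:Int) < 13 then char_to_symbol (PySem.List.pyGetD name.toList 5 ' ') else 0,
     if (6:Int) < (name.toList.length:Int) ∧ (6:Int) < 13 then char_to_symbol (PySem.List.pyGetD name.toList 6 ' ') else 0,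
     if (7:Int) < (name.toList.length:Int) ∧ (7:Int) < 13 then char_to_symbol (PySem.List.pyGetD name.toList 7 ' ') else 0,
     if (8:Int) < (name.toList.length:Int) ∧ (8:Int) < 13 then char_to_symbol (PySem.List.pyGetD name.toList 8 ' ') else 0,
     if (9:Int) < (name.toList.length:Int) ∧ (9:Int) < 13 then char_to_symbol (PySem.List.pyGetD name.toList 9 ' ') else 0,
     if (10:Int) < (name.toList.length:Int) ∧ (10:Int) < 13 then char_to_symbol (PySem.List.pyGetD name.toList 10 ' ') else 0,
     if (11:Int) < (name.toList.length:Int) ∧ (11:Int) < 13 then char_to_symbol (PySem.List.pyGetD name.toList 11 ' ') else 0,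
     if (12:Int) < (name.toList.length:Int) ∧ (12:Int) < 13 then char_to_symbol (PySem.List.pyGetD name.toList 12 ' ') else 0] := by
  rw [PySem.List.slice_to name.toList (b := 13) (by norm_num), show ((13:Int)).toNat = 13 from rfl]
  apply List.ext_getElem
  · simp [List.length_take]
  · intro k h1 h2
    have hk : k < 13 := by simpa using h2
    rw [List.getElem_take, pad13_get _ k hk]
    interval_cases k <;> norm_num

-- take 12 factors through take 13
theorem take12_of_take13 (l : List Int) : l.take 12 = (l.take 13).take 12 := by
  rw [List.take_take]
  norm_num

-- pyGetD at 12 on B's (at-least-13-long) symbol list reads inside its first 13 entries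
theorem pyGetD_syms (l : List Int) : PySem.List.pyGetD l 12 0 = (l.take 13).getD 12 0 := by
  rw [show (12:Int) = ((12:Nat):Int) from rfl, PySem.List.pyGetD_natCast]
  simp [List.getD_eq_getElem?_getD]

theorem getD12 (a0 a1 a2 a3 a4 a5 a6 a7 a8 a9 a10 a11 a12 : Int) :
    List.getD [a0,a1,a2,a3,a4,a5,a6,a7,a8,a9,a10,a11,a12] 12 0 = a12 := rfl

-- ===== VERDICT (by name: the statement is the Claim_ definition above) =====
theorem name_to_number_spec : Claim_equal_name_to_number := by
  intro name _
  unfold Spec_name_to_number name_to_number name_to_number_alt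
  rw [show PySem.List.pyRange 0 13 1 = [0,1,2,3,4,5,6,7,8,9,10,11,12] by decide]
  simp only [List.foldl, PySem.Str.len_eq]
  rw [PySem.List.slice_to _ (b := 12) (by norm_num), show ((12:Int)).toNat = 12 from rfl]
  rw [PySem.Int.mod_eq_emod_of_pos (by norm_num)]
  rw [pyGetD_syms, take12_of_take13, syms_eq name, getD12]
  simp only [List.take, List.foldl, List.append_assoc, List.nil_append]
  rw [chunk5 _ _ _ (ifsym_bound _ _).1 (ifsym_bound _ _).2]
  rw [chunk5 _ _ _ (ifsym_bound _ _).1 (ifsym_bound _ _).2]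
  rw [chunk5 _ _ _ (ifsym_bound _ _).1 (ifsym_bound _ _).2]
  rw [chunk5 _ _ _ (ifsym_bound _ _).1 (ifsym_bound _ _).2]
  rw [chunk5 _ _ _ (ifsym_bound _ _).1 (ifsym_bound _ _).2]
  rw [chunk5 _ _ _ (ifsym_bound _ _).1 (ifsym_bound _ _).2]
  rw [chunk5 _ _ _ (ifsym_bound _ _).1 (ifsym_bound _ _).2]
  rw [chunk5 _ _ _ (ifsym_bound _ _).1 (ifsym_bound _ _).2]
  rw [chunk5 _ _ _ (ifsym_bound _ _).1 (ifsym_bound _ _).2]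
  rw [chunk5 _ _ _ (ifsym_bound _ _).1 (ifsym_bound _ _).2]
  rw [chunk5 _ _ _ (ifsym_bound _ _).1 (ifsym_bound _ _).2]
  rw [chunk5 _ _ _ (ifsym_bound _ _).1 (ifsym_bound _ _).2]
  rw [chunk4 _ _ (Int.emod_nonneg _ (by norm_num)) (Int.emod_lt_of_pos _ (by norm_num))]
  simp only [show ((64:Int) - 5 * (0 + 1)).toNat = 59 from rfl, show ((64:Int) - 5 * (1 + 1)).toNat = 54 from rfl, show ((64:Int) - 5 * (2 + 1)).toNat = 49 from rfl, show ((64:Int) - 5 * (3 + 1)).toNat = 44 from rfl, show ((64:Int) - 5 * (4 + 1)).toNat = 39 from rfl, show ((64:Int) - 5 * (5 + 1)).toNat = 34 from rfl, show ((64:Int) - 5 * (6 + 1)).toNat = 29 from rfl, show ((64:Int) - 5 * (7 + 1)).toNat = 24 from rfl, show ((64:Int) - 5 * (8 + 1)).toNat = 19 from rfl, show ((64:Int) - 5 * (9 + 1)).toNat = 14 from rfl, show ((64:Int) - 5 * (10 + 1)).toNat = 9 from rfl, show ((64:Int) - 5 * (11 + 1)).toNat = 4 from rfl]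
  exact core _ _ _ _ _ _ _ _ _ _ _ _ _ (ifsym_bound _ _) (ifsym_bound _ _) (ifsym_bound _ _)
    (ifsym_bound _ _) (ifsym_bound _ _) (ifsym_bound _ _) (ifsym_bound _ _) (ifsym_bound _ _)
    (ifsym_bound _ _) (ifsym_bound _ _) (ifsym_bound _ _) (ifsym_bound _ _) (ifsym_bound _ _)
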